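-- pv_equiv track=rewrite | github.com/doc291/project-horizon | aisstream_scraper.py | _ais_type_label
-- ===== SOURCE A (Python) =====
-- _AIS_TYPES = {
--     range(70, 80): "Cargo",
--     range(80, 90): "Tanker",
--     range(60, 70): "Passenger",
--     range(30, 33): "Fishing / Towing",
--     range(35, 36): "Military",
--     range(36, 38): "Sailing / Pleasure",
-- }
--
-- def _ais_type_label(code: int) -> str:
--     for r, label in _AIS_TYPES.items():
--         if code in r:
--             return label
--     if code == 71: return "Cargo"
--     if code == 72: return "Cargo"
--     if code == 73: return "Cargo, Tanker"
--     if code == 74: return "Bulk Carrier"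
--     if code == 79: return "Cargo"
--     if code == 89: return "Tanker"
--     return "Other"
-- ===== SOURCE B (Python) =====
-- # Flat lookup table built once: each concrete code maps to its label; function is a single dict.get.
-- _AIS_TABLE = {}
-- for _start, _stop, _label in (
--     (70, 80, "Cargo"),
--     (80, 90, "Tanker"),
--     (60, 70, "Passenger"),
--     (30, 33, "Fishing / Towing"),
--     (35, 36, "Military"),
--     (36, 38, "Sailing / Pleasure"),
-- ):
--     for _c in range(_start, _stop):
--         _AIS_TABLE[_c] = _label
--
-- def _ais_type_label(code: int) -> str:
--     return _AIS_TABLE.get(code, "Other")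
-- ===== Notes on version B (the rewrite author's own statement) =====
-- stated objective: idiomatic
-- what changed: Replaces the linear scan over range objects plus a dead if-chain with one flat dict from each concrete code to its label, built once at module load; the function is a single dict lookup.
import Mathlib
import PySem

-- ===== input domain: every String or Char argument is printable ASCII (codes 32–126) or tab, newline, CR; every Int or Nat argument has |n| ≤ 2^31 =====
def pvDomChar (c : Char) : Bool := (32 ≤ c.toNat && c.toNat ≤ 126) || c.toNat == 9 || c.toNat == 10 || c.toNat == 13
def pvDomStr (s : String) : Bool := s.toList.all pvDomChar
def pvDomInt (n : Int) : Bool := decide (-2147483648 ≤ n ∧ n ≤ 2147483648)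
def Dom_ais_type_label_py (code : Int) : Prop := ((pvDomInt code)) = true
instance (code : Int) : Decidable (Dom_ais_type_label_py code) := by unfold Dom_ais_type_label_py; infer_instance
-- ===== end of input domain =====

-- B replaces A's scan over range buckets (plus an unreachable if-chain) by one flat
-- code→label dict built once; the function body is a single lookup with default.

-- ===== PORT A =====
-- _AIS_TYPES as an insertion-ordered list of ((start, stop), label); 'code in range(a, b)'
-- with step 1 is exactly a ≤ code < b (exact for int code).
def aisTypes : List ((Int × Int) × String) :=
  [((70, 80), "Cargo"), ((80, 90), "Tanker"), ((60, 70), "Passenger"),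
   ((30, 33), "Fishing / Towing"), ((35, 36), "Military"), ((36, 38), "Sailing / Pleasure")]

-- the 'for r, label in _AIS_TYPES.items(): if code in r: return label' loop
def aisLoop (code : Int) : List ((Int × Int) × String) → Option String
  | [] => none
  | ((a, b), label) :: rest =>
      if a ≤ code ∧ code < b then some label else aisLoop code rest

def ais_type_label_py (code : Int) : String :=
  match aisLoop code aisTypes with
  | some label => label
  | none =>
      if code = 71 then "Cargo"
      else if code = 72 then "Cargo"
      else if code = 73 then "Cargo, Tanker"
      else if code = 74 then "Bulk Carrier"
      else if code = 79 then "Cargo"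
      else if code = 89 then "Tanker"
      else "Other"

-- ===== PORT B =====
-- the module-load loop of Source B filling _AIS_TABLE
def aisTable : PySem.Dict Int String :=
  [((70 : Int), (80 : Int), "Cargo"), (80, 90, "Tanker"), (60, 70, "Passenger"),
   (30, 33, "Fishing / Towing"), (35, 36, "Military"), (36, 38, "Sailing / Pleasure")].foldl
    (fun d t => (PySem.List.pyRange t.1 t.2.1 1).foldl (fun d c => d.insert c t.2.2) d)
    PySem.Dict.empty

def ais_type_label_py_alt (code : Int) : String :=
  aisTable.getD code "Other"

-- ===== PRECONDITION & SPEC =====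
def Spec_ais_type_label_py (code : Int) (out : String) : Prop := out = ais_type_label_py_alt code
instance (code : Int) (out : String) : Decidable (Spec_ais_type_label_py code out) := by unfold Spec_ais_type_label_py; infer_instance

-- ===== CLAIM (what is proved, stated in full; the proofs are below) =====
def Claim_equal_ais_type_label_py : Prop := ∀ (code : Int), Dom_ais_type_label_py code → Spec_ais_type_label_py code (ais_type_label_py code)

-- ===== LEMMAS AND PROOFS =====

-- the built table, evaluated once
theorem aisTable_eval : aisTable = PySem.Dict.mk
    [(70, "Cargo"), (71, "Cargo"), (72, "Cargo"), (73, "Cargo"), (74, "Cargo"),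
     (75, "Cargo"), (76, "Cargo"), (77, "Cargo"), (78, "Cargo"), (79, "Cargo"),
     (80, "Tanker"), (81, "Tanker"), (82, "Tanker"), (83, "Tanker"), (84, "Tanker"),
     (85, "Tanker"), (86, "Tanker"), (87, "Tanker"), (88, "Tanker"), (89, "Tanker"),
     (60, "Passenger"), (61, "Passenger"), (62, "Passenger"), (63, "Passenger"),
     (64, "Passenger"), (65, "Passenger"), (66, "Passenger"), (67, "Passenger"),
     (68, "Passenger"), (69, "Passenger"),
     (30, "Fishing / Towing"), (31, "Fishing / Towing"), (32, "Fishing / Towing"),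
     (35, "Military"), (36, "Sailing / Pleasure"), (37, "Sailing / Pleasure")] := by
  decide

-- ===== VERDICT (by name: the statement is the Claim_ definition above) =====
set_option maxHeartbeats 2000000 in
theorem ais_type_label_py_spec : Claim_equal_ais_type_label_py := by
  intro code _
  unfold Spec_ais_type_label_py ais_type_label_py ais_type_label_py_alt
  rw [aisTable_eval]
  by_cases h1 : 70 ≤ code ∧ code < 80
  · obtain ⟨ha, hb⟩ := h1; interval_cases code <;> decide
  by_cases h2 : 80 ≤ code ∧ code < 90
  · obtain ⟨ha, hb⟩ := h2; interval_cases code <;> decide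
  by_cases h3 : 60 ≤ code ∧ code < 70
  · obtain ⟨ha, hb⟩ := h3; interval_cases code <;> decide
  by_cases h4 : 30 ≤ code ∧ code < 33
  · obtain ⟨ha, hb⟩ := h4; interval_cases code <;> decide
  by_cases h5 : 35 ≤ code ∧ code < 38
  · obtain ⟨ha, hb⟩ := h5; interval_cases code <;> decide
  · have hA : aisLoop code aisTypes = none := by
      simp only [aisTypes, aisLoop]
      rw [if_neg (by omega), if_neg (by omega), if_neg (by omega), if_neg (by omega),
        if_neg (by omega), if_neg (by omega)]
    rw [hA, PySem.Dict.getD_of_not_contains _ _ (by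
      simp only [PySem.Dict.contains_mk, List.any_cons, List.any_nil, Bool.or_eq_false_iff,
        beq_eq_false_iff_ne]
      and_intros <;> first | trivial | omega)]
    rw [if_neg (by omega), if_neg (by omega), if_neg (by omega), if_neg (by omega),
      if_neg (by omega), if_neg (by omega)]
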